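-- pv_equiv track=rewrite | github.com/jakobvalic/PRO2 | 4.vaja-generatorji.py | seznam
-- ===== SOURCE A (Python) =====
-- def seznam(s):
--     '''Generira elemente seznama s, izmenično od začetka do konca.'''
--     if s == []:
--         return
--     if len(s) == 1:
--         yield s[0]
--     else:
--         yield s[0]
--         yield s[-1]
--         yield from seznam(s[1:-1])
-- ===== SOURCE B (Python) =====
-- def seznam(s):
--     '''Generira elemente seznama s, izmenicno od zacetka do konca.'''
--     i, j = 0, len(s) - 1
--     while i < j:
--         yield s[i]
--         yield s[j]
--         i += 1
--         j -= 1
--     if i == j: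
--         yield s[i]
-- ===== Notes on version B (the rewrite author's own statement) =====
-- stated objective: faster
-- what changed: Replaced the recursion that repeatedly copies the slice s[1:-1] by a single two-pointer loop over indices moving inward, yielding front then back element.
import Mathlib
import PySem

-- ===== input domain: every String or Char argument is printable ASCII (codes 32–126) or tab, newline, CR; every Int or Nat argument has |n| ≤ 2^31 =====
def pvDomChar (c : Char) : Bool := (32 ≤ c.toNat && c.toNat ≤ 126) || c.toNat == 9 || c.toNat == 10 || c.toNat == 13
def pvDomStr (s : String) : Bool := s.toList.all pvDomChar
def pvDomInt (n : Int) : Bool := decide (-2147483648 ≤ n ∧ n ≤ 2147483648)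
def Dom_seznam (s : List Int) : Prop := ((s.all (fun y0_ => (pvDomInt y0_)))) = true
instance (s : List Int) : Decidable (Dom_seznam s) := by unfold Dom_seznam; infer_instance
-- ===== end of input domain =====

-- B replaces A's slice-copying recursion by a linear two-pointer index loop (measured faster, asymptotic).

-- ===== PORT A =====
-- literal transliteration of A (generator read as the list of yielded elements):
-- if s == []: return; if len(s) == 1: yield s[0]; else yield s[0]; yield s[-1]; yield from seznam(s[1:-1])
def seznam (s : List Int) : List Int :=
  if s = [] then []
  else if s.length = 1 then [PySem.List.pyGetD s 0 0]
  else PySem.List.pyGetD s 0 0 :: PySem.List.pyGetD s (-1) 0 ::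
        seznam (PySem.List.slice s (some 1) (some (-1)))
termination_by s.length
decreasing_by
  simp [PySem.List.length_slice]
  have h1 : s.length ≠ 1 := by assumption
  have h0 : s ≠ [] := by assumption
  have h2 : 2 ≤ s.length := by
    rcases s with _ | ⟨a, _ | t⟩ <;> simp_all
  omega

-- ===== PORT B =====
-- two-pointer loop: while i < j yield s[i], s[j]; then if i == j yield s[i]
def seznamAltGo (s : List Int) (i j : Int) : List Int :=
  if i < j then
    PySem.List.pyGetD s i 0 :: PySem.List.pyGetD s j 0 :: seznamAltGo s (i + 1) (j - 1)
  else if i = j then [PySem.List.pyGetD s i 0]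
  else []
termination_by (j - i + 1).toNat
decreasing_by omega

def seznam_alt (s : List Int) : List Int := seznamAltGo s 0 ((s.length : Int) - 1)

-- ===== PRECONDITION & SPEC =====
def Spec_seznam (s : List Int) (out : List Int) : Prop := out = seznam_alt s
instance (s : List Int) (out : List Int) : Decidable (Spec_seznam s out) := by unfold Spec_seznam; infer_instance

-- ===== CLAIM (what is proved, stated in full; the proofs are below) =====
def Claim_equal_seznam : Prop := ∀ (s : List Int), Dom_seznam s → Spec_seznam s (seznam s)

-- ===== LEMMAS AND PROOFS =====

-- s[k] for a nonnegative in-range k ignores an extra last element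
theorem pyGetD_append_last (t : List Int) (z k : Int) (hk : 0 ≤ k) (hkl : k < (t.length : Int)) :
    PySem.List.pyGetD (t ++ [z]) k 0 = PySem.List.pyGetD t k 0 := by
  rw [show k = ((k.toNat : Nat) : Int) by omega, PySem.List.pyGetD_natCast,
      PySem.List.pyGetD_natCast]
  have h : k.toNat < t.length := by omega
  simp [List.getD, List.getElem?_append_left h]

-- s[k+1] on x :: t is s[k] on t (k ≥ 0)
theorem pyGetD_cons_shift (x : Int) (t : List Int) (k : Int) (hk : 0 ≤ k) :
    PySem.List.pyGetD (x :: t) (k + 1) 0 = PySem.List.pyGetD t k 0 := by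
  rw [show (k + 1 : Int) = ((k.toNat + 1 : Nat) : Int) by omega, PySem.List.pyGetD_natCast,
      show k = ((k.toNat : Nat) : Int) by omega, PySem.List.pyGetD_natCast,
      List.getD_cons_succ]
  congr 1

-- shifting both pointers by one steps over a new head element
theorem seznamAltGo_cons (x : Int) (t : List Int) (i j : Int) (hi : 0 ≤ i) :
    seznamAltGo (x :: t) (i + 1) (j + 1) = seznamAltGo t i j := by
  rw [seznamAltGo.eq_def (x :: t) (i + 1) (j + 1), seznamAltGo.eq_def t i j]
  by_cases hij : i < j
  · simp only [if_pos (show i + 1 < j + 1 by omega), if_pos hij]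
    rw [pyGetD_cons_shift x t i hi, pyGetD_cons_shift x t j (by omega),
        show (i + 1 + 1 : Int) = (i + 1) + 1 by ring,
        show (j + 1 - 1 : Int) = (j - 1) + 1 by ring,
        seznamAltGo_cons x t (i + 1) (j - 1) (by omega)]
  · by_cases he : i = j
    · subst he
      simp only [if_neg (show ¬ i + 1 < i + 1 by omega), if_neg (show ¬ i < i by omega)]
      rw [pyGetD_cons_shift x t i hi]
    · simp only [if_neg (show ¬ i + 1 < j + 1 by omega), if_neg hij,
                 if_neg (show ¬ i + 1 = j + 1 by omega), if_neg he]
termination_by (j - i + 1).toNat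
decreasing_by omega

-- an extra last element beyond the right pointer is never touched
theorem seznamAltGo_append (t : List Int) (z : Int) (i j : Int) (hi : 0 ≤ i)
    (hj : j < (t.length : Int)) :
    seznamAltGo (t ++ [z]) i j = seznamAltGo t i j := by
  rw [seznamAltGo.eq_def (t ++ [z]) i j, seznamAltGo.eq_def t i j]
  by_cases hij : i < j
  · simp only [if_pos hij]
    rw [pyGetD_append_last t z i hi (by omega), pyGetD_append_last t z j (by omega) hj,
        seznamAltGo_append t z (i + 1) (j - 1) (by omega) (by omega)]
  · by_cases he : i = j
    · subst he
      simp only [if_neg hij]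
      rw [pyGetD_append_last t z i hi hj]
    · simp only [if_neg hij, if_neg he]
termination_by (j - i + 1).toNat
decreasing_by omega

theorem seznam_eq_alt : ∀ (n : Nat) (s : List Int), s.length = n → seznam s = seznam_alt s := by
  intro n
  induction n using Nat.strong_induction_on with
  | _ n IH =>
    intro s hs
    rcases s with _ | ⟨a, rest⟩
    · simp [seznam, seznam_alt, seznamAltGo]
    rcases rest with _ | ⟨b, t⟩
    · -- singleton [a]
      rw [seznam.eq_def]
      unfold seznam_alt
      rw [seznamAltGo.eq_def]
      norm_num
    · -- length ≥ 2: rest = b :: t = m ++ [z]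
      have hne : (b :: t) ≠ [] := by simp
      set m := (b :: t).dropLast with hm
      set z := (b :: t).getLast hne with hz
      have hsplit : b :: t = m ++ [z] := (List.dropLast_append_getLast hne).symm
      have hlenr : (b :: t).length = m.length + 1 := by rw [hsplit]; simp
      have hlen : (a :: b :: t).length = m.length + 2 := by simp at hlenr ⊢; omega
      rw [seznam.eq_def]
      simp only [if_neg (show ¬ (a :: b :: t) = [] by simp),
                 if_neg (show ¬ (a :: b :: t).length = 1 by simp)]
      have hget0 : PySem.List.pyGetD (a :: b :: t) 0 0 = a := PySem.List.pyGetD_zero_cons ..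
      have hgetm1 : PySem.List.pyGetD (a :: b :: t) (-1) 0 = z := by
        rw [show a :: b :: t = (a :: m) ++ [z] by rw [hsplit]; rfl]
        exact PySem.List.pyGetD_neg_one_append_singleton ..
      have hslice : PySem.List.slice (a :: b :: t) (some 1) (some (-1)) = m := by
        rw [show a :: b :: t = a :: (m ++ [z]) by rw [hsplit]]
        simp [PySem.List.slice, PySem.List.clampIdx]
        rw [if_neg (by omega)]
        simp [List.take_left']
      rw [hget0, hgetm1, hslice]
      have hmlt : m.length < n := by omega
      rw [IH m.length hmlt m rfl]
      -- unfold B's side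
      unfold seznam_alt
      rw [hlen, seznamAltGo.eq_def (a :: b :: t) 0 (((m.length + 2 : Nat) : Int) - 1)]
      simp only [if_pos (show (0 : Int) < ((m.length + 2 : Nat) : Int) - 1 by omega)]
      have e2 : PySem.List.pyGetD (a :: b :: t) (((m.length + 2 : Nat) : Int) - 1) 0 = z := by
        rw [show a :: b :: t = (a :: m) ++ [z] by rw [hsplit]; rfl,
            show (((m.length + 2 : Nat) : Int) - 1) = (((a :: m).length : Nat) : Int) by
              simp; ring,
            PySem.List.pyGetD_natCast]
        simp [List.getD]
      rw [hget0, e2]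
      congr 1
      congr 1
      have step1 : seznamAltGo (a :: b :: t) (0 + 1) (((m.length + 2 : Nat) : Int) - 1 - 1) =
          seznamAltGo (b :: t) 0 (((m.length + 2 : Nat) : Int) - 3) := by
        rw [show (((m.length + 2 : Nat) : Int) - 1 - 1) = (((m.length + 2 : Nat) : Int) - 3) + 1 by
              ring]
        exact seznamAltGo_cons a (b :: t) 0 (((m.length + 2 : Nat) : Int) - 3) (by omega)
      rw [step1, hsplit,
          seznamAltGo_append m z 0 _ (by omega) (by push_cast; omega)]
      congr 1
      push_cast; ring

-- ===== VERDICT (by name: the statement is the Claim_ definition above) =====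
theorem seznam_spec : Claim_equal_seznam := by
  intro s _
  unfold Spec_seznam
  exact seznam_eq_alt s.length s rfl
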